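-- pv_equiv track=rewrite | github.com/ForceFour/FinTrack | src/utils/pattern_analysis.py | _get_season_name
-- ===== SOURCE A (Python) =====
-- from typing import List, Dict, Any, Tuple
--
-- def _get_season_name(months: List[int]) -> str:
--     """Get season name based on peak months"""
--     if any(month in [12, 1, 2] for month in months):
--         return 'winter'
--     elif any(month in [3, 4, 5] for month in months):
--         return 'spring'
--     elif any(month in [6, 7, 8] for month in months):
--         return 'summer'
--     elif any(month in [9, 10, 11] for month in months):
--         return 'fall'
--     else:
--         return 'year-round'
-- ===== SOURCE B (Python) =====
-- _MONTH_TO_SEASON = {12: 'winter', 1: 'winter', 2: 'winter',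
--                     3: 'spring', 4: 'spring', 5: 'spring',
--                     6: 'summer', 7: 'summer', 8: 'summer',
--                     9: 'fall', 10: 'fall', 11: 'fall'}
--
-- _PRIORITY = ['winter', 'spring', 'summer', 'fall']
--
--
-- def _get_season_name(months):
--     present = set()
--     for m in months:
--         season = _MONTH_TO_SEASON.get(m)
--         if season is not None:
--             present.add(season)
--     for season in _PRIORITY:
--         if season in present:
--             return season
--     return 'year-round'
-- ===== Notes on version B (the rewrite author's own statement) =====
-- stated objective: alternative
-- what changed: Replaced A's four sequential any() scans over the whole list by a single pass that maps each month through a constant month-to-season dict into a set of present seasons, followed by a fixed 4-element priority scan.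
import Mathlib
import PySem

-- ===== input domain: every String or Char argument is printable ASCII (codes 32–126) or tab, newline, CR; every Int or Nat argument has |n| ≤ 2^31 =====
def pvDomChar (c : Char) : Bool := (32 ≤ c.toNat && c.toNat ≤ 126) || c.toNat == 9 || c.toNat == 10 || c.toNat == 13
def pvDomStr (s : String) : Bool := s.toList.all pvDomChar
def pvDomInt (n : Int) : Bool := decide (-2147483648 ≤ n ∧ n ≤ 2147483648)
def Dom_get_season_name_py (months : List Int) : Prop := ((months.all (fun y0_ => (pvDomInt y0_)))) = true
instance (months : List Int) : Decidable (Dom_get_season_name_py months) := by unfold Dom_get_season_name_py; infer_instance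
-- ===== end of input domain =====

-- B replaces A's four sequential any() scans by one dict-lookup pass into a set of present
-- seasons plus a fixed 4-element priority scan (objective: alternative decomposition).

-- ===== PORT A =====
def get_season_name_py (months : List Int) : String :=
  if months.any (fun month => ([12, 1, 2] : List Int).contains month) then "winter"
  else if months.any (fun month => ([3, 4, 5] : List Int).contains month) then "spring"
  else if months.any (fun month => ([6, 7, 8] : List Int).contains month) then "summer"
  else if months.any (fun month => ([9, 10, 11] : List Int).contains month) then "fall"
  else "year-round"

-- ===== PORT B =====
def monthToSeason : PySem.Dict Int String :=
  PySem.Dict.ofList [(12, "winter"), (1, "winter"), (2, "winter"),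
                     (3, "spring"), (4, "spring"), (5, "spring"),
                     (6, "summer"), (7, "summer"), (8, "summer"),
                     (9, "fall"), (10, "fall"), (11, "fall")]

def priorityList : List String := ["winter", "spring", "summer", "fall"]

def get_season_name_py_alt (months : List Int) : String :=
  let present : PySem.Set String := months.foldl (fun acc m =>
      match monthToSeason.get? m with
      | some season => PySem.Set.add acc season
      | none => acc) PySem.Set.empty
  match priorityList.find? (fun season => PySem.Set.contains present season) with
  | some season => season
  | none => "year-round"

-- ===== PRECONDITION & SPEC =====
def Spec_get_season_name_py (months : List Int) (out : String) : Prop := out = get_season_name_py_alt months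
instance (months : List Int) (out : String) : Decidable (Spec_get_season_name_py months out) := by unfold Spec_get_season_name_py; infer_instance

-- ===== CLAIM (what is proved, stated in full; the proofs are below) =====
def Claim_equal_get_season_name_py : Prop := ∀ (months : List Int), Dom_get_season_name_py months → Spec_get_season_name_py months (get_season_name_py months)

-- ===== LEMMAS AND PROOFS =====

set_option maxHeartbeats 1000000 in
theorem get?_monthToSeason (m : Int) :
    monthToSeason.get? m =
      if m = 12 ∨ m = 1 ∨ m = 2 then some "winter"
      else if m = 3 ∨ m = 4 ∨ m = 5 then some "spring"
      else if m = 6 ∨ m = 7 ∨ m = 8 then some "summer"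
      else if m = 9 ∨ m = 10 ∨ m = 11 then some "fall"
      else none := by
  have h : monthToSeason = PySem.Dict.mk [(12, "winter"), (1, "winter"), (2, "winter"),
      (3, "spring"), (4, "spring"), (5, "spring"), (6, "summer"), (7, "summer"), (8, "summer"),
      (9, "fall"), (10, "fall"), (11, "fall")] := by rfl
  rw [h]
  simp only [PySem.Dict.get?_mk_cons, beq_iff_eq]
  split_ifs <;> first | rfl | omega

theorem mem_present (months : List Int) (init : PySem.Set String) (s : String) :
    s ∈ months.foldl (fun acc m =>
        match monthToSeason.get? m with
        | some season => PySem.Set.add acc season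
        | none => acc) init ↔
      s ∈ init ∨ ∃ m ∈ months, monthToSeason.get? m = some s := by
  induction months generalizing init with
  | nil => simp
  | cons x xs ih =>
    simp only [List.foldl_cons, ih, List.mem_cons]
    cases h : monthToSeason.get? x <;>
      simp [h, PySem.Set.mem_add]; tauto

theorem lookup_winter (m : Int) :
    monthToSeason.get? m = some "winter" ↔ m = 12 ∨ m = 1 ∨ m = 2 := by
  rw [get?_monthToSeason]; split_ifs <;> simp_all <;> omega

theorem lookup_spring (m : Int) :
    monthToSeason.get? m = some "spring" ↔ m = 3 ∨ m = 4 ∨ m = 5 := by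
  rw [get?_monthToSeason]; split_ifs <;> simp_all <;> omega

theorem lookup_summer (m : Int) :
    monthToSeason.get? m = some "summer" ↔ m = 6 ∨ m = 7 ∨ m = 8 := by
  rw [get?_monthToSeason]; split_ifs <;> simp_all <;> omega

theorem lookup_fall (m : Int) :
    monthToSeason.get? m = some "fall" ↔ m = 9 ∨ m = 10 ∨ m = 11 := by
  rw [get?_monthToSeason]; split_ifs <;> simp_all <;> omega

theorem get_season_name_py_spec_aux (months : List Int) :
    get_season_name_py months = get_season_name_py_alt months := by
  unfold get_season_name_py get_season_name_py_alt priorityList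
  have hpw : PySem.Set.contains (months.foldl (fun acc m =>
      match monthToSeason.get? m with
      | some season => PySem.Set.add acc season
      | none => acc) PySem.Set.empty) "winter"
      = months.any (fun month => ([12, 1, 2] : List Int).contains month) := by
    rw [Bool.eq_iff_iff, PySem.Set.contains_iff, mem_present]
    simp [List.any_eq_true, lookup_winter]
  have hps : PySem.Set.contains (months.foldl (fun acc m =>
      match monthToSeason.get? m with
      | some season => PySem.Set.add acc season
      | none => acc) PySem.Set.empty) "spring"
      = months.any (fun month => ([3, 4, 5] : List Int).contains month) := by
    rw [Bool.eq_iff_iff, PySem.Set.contains_iff, mem_present]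
    simp [List.any_eq_true, lookup_spring]
  have hpm : PySem.Set.contains (months.foldl (fun acc m =>
      match monthToSeason.get? m with
      | some season => PySem.Set.add acc season
      | none => acc) PySem.Set.empty) "summer"
      = months.any (fun month => ([6, 7, 8] : List Int).contains month) := by
    rw [Bool.eq_iff_iff, PySem.Set.contains_iff, mem_present]
    simp [List.any_eq_true, lookup_summer]
  have hpf : PySem.Set.contains (months.foldl (fun acc m =>
      match monthToSeason.get? m with
      | some season => PySem.Set.add acc season
      | none => acc) PySem.Set.empty) "fall"
      = months.any (fun month => ([9, 10, 11] : List Int).contains month) := by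
    rw [Bool.eq_iff_iff, PySem.Set.contains_iff, mem_present]
    simp [List.any_eq_true, lookup_fall]
  simp only [List.find?, hpw, hps, hpm, hpf]
  cases months.any (fun month => ([12, 1, 2] : List Int).contains month) <;>
  cases months.any (fun month => ([3, 4, 5] : List Int).contains month) <;>
  cases months.any (fun month => ([6, 7, 8] : List Int).contains month) <;>
  cases months.any (fun month => ([9, 10, 11] : List Int).contains month) <;> rfl

-- ===== VERDICT (by name: the statement is the Claim_ definition above) =====
theorem get_season_name_py_spec : Claim_equal_get_season_name_py := by
  intro months _
  exact get_season_name_py_spec_aux months
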